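-- pv_equiv track=rewrite | github.com/pypi-data/pypi-mirror-26 | packages/TensorMol/TensorMol-0.1.tar.gz/TensorMol-0.1/TensorMol/MolFrag.py | String_To_Atoms
-- ===== SOURCE A (Python) =====
-- def String_To_Atoms(s=""):
-- 	l = list(s)
-- 	atom_l = []
-- 	tmp = ""
-- 	for i, c in enumerate(l):
-- 		if  ord('A') <= ord(c) <= ord('Z'):
-- 			tmp=c
-- 		else:
-- 			tmp += c
-- 		if i==len(l)-1:
-- 			atom_l.append(tmp)
-- 		elif ord('A') <= ord(l[i+1]) <= ord('Z'):
-- 			atom_l.append(tmp)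
-- 		else:
-- 			continue
-- 	return atom_l
-- ===== SOURCE B (Python) =====
-- def String_To_Atoms(s=""):
-- 	atoms = []
-- 	for c in s:
-- 		if 'A' <= c <= 'Z' or not atoms:
-- 			atoms.append(c)
-- 		else:
-- 			atoms[-1] += c
-- 	return atoms
-- ===== Notes on version B (the rewrite author's own statement) =====
-- stated objective: simpler
-- what changed: Replaces A's lookahead-and-flush loop (peeking at l[i+1] and a special end-of-string branch) with a single pass that appends a new token on an uppercase letter and otherwise extends the last token in place.
import Mathlib
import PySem

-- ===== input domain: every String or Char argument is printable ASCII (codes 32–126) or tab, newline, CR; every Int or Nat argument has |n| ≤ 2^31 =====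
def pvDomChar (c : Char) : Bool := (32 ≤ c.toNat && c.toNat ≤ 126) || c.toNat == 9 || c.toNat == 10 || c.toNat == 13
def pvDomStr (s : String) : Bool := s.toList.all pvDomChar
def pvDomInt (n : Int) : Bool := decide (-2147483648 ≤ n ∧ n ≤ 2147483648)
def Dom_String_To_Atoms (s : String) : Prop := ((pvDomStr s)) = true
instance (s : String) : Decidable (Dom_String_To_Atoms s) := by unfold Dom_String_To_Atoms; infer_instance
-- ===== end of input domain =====

-- B drops A's lookahead/flush-at-boundary logic: one pass that starts a new token on an
-- uppercase letter and otherwise extends the last token in place (objective: simpler).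

-- ===== PORT A =====
-- enumerate(l) starting at index k (helper for the literal port of A's `for i, c in enumerate(l)`)
def pvEnum {α : Type} (k : Nat) : List α → List (Nat × α)
  | [] => []
  | c :: cs => (k, c) :: pvEnum (k + 1) cs

-- loop body of A; L is the whole character list (for `len(l)` and the lookahead `l[i+1]`);
-- state is (atom_l, tmp) with tmp kept as List Char (Python string of chars)
def aStep (L : List Char) (st : List String × List Char) (ic : Nat × Char) :
    List String × List Char :=
  let i := ic.1
  let c := ic.2
  let tmp := if 'A' ≤ c ∧ c ≤ 'Z' then [c] else st.2 ++ [c]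
  if i = L.length - 1 then (st.1 ++ [String.mk tmp], tmp)
  else if 'A' ≤ L.getD (i + 1) ' ' ∧ L.getD (i + 1) ' ' ≤ 'Z' then
    (st.1 ++ [String.mk tmp], tmp)
  else
    (st.1, tmp)

def String_To_Atoms (s : String) : List String :=
  let l := s.toList
  ((pvEnum 0 l).foldl (aStep l) ([], [])).1

-- ===== PORT B =====
-- loop body of B: uppercase (or empty result) starts a new token, otherwise extend the last;
-- tokens kept as List Char, converted with String.mk at the end
def bStep (atoms : List (List Char)) (c : Char) : List (List Char) :=
  if ('A' ≤ c ∧ c ≤ 'Z') ∨ atoms = [] then atoms ++ [[c]]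
  else atoms.dropLast ++ [atoms.getLast! ++ [c]]

def String_To_Atoms_alt (s : String) : List String :=
  (s.toList.foldl bStep []).map String.mk

-- ===== PRECONDITION & SPEC =====
def Spec_String_To_Atoms (s : String) (out : List String) : Prop := out = String_To_Atoms_alt s
instance (s : String) (out : List String) : Decidable (Spec_String_To_Atoms s out) := by unfold Spec_String_To_Atoms; infer_instance

-- ===== CLAIM (what is proved, stated in full; the proofs are below) =====
def Claim_equal_String_To_Atoms : Prop := ∀ (s : String), Dom_String_To_Atoms s → Spec_String_To_Atoms s (String_To_Atoms s)

-- ===== LEMMAS AND PROOFS =====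

-- common tokenization spec: cur is the token in progress
def goTok (cur : List Char) : List Char → List (List Char)
  | [] => [cur]
  | c :: cs => if 'A' ≤ c ∧ c ≤ 'Z' then cur :: goTok [c] cs else goTok (cur ++ [c]) cs

-- B's fold from a nonempty accumulator computes goTok on the last token
theorem b_go (cs : List Char) : ∀ (done : List (List Char)) (cur : List Char),
    List.foldl bStep (done ++ [cur]) cs = done ++ goTok cur cs := by
  induction cs with
  | nil => intro done cur; simp [goTok]
  | cons c cs ih =>
    intro done cur
    by_cases h : 'A' ≤ c ∧ c ≤ 'Z'
    · have hstep : bStep (done ++ [cur]) c = (done ++ [cur]) ++ [[c]] := by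
        simp [bStep, h]
      rw [List.foldl_cons, hstep]
      rw [ih (done ++ [cur]) [c]]
      simp [goTok, h]
    · have hne : done ++ [cur] ≠ [] := by simp
      have hstep : bStep (done ++ [cur]) c = done ++ [cur ++ [c]] := by
        simp [bStep, h, hne]
      rw [List.foldl_cons, hstep, ih done (cur ++ [c])]
      simp [goTok, h]

-- A's fold with lookahead computes goTok on the suffix
theorem a_go (cs : List Char) : ∀ (c : Char) (k : Nat) (L : List Char)
    (acc : List String) (tmp : List Char), L.drop k = c :: cs →
    ((pvEnum k (c :: cs)).foldl (aStep L) (acc, tmp)).1 =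
      acc ++ (goTok (if 'A' ≤ c ∧ c ≤ 'Z' then [c] else tmp ++ [c]) cs).map String.mk := by
  induction cs with
  | nil =>
    intro c k L acc tmp hdrop
    have hlen := congrArg List.length hdrop
    simp only [List.length_drop, List.length_cons, List.length_nil] at hlen
    have hk : k = L.length - 1 := by omega
    simp [pvEnum, aStep, hk, goTok]
  | cons d ds ih =>
    intro c k L acc tmp hdrop
    have hlen := congrArg List.length hdrop
    simp only [List.length_drop, List.length_cons] at hlen
    have hk : k ≠ L.length - 1 := by omega
    have hdrop' : L.drop (k + 1) = d :: ds := by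
      have h := congrArg (List.drop 1) hdrop
      simpa [List.drop_drop, Nat.add_comm] using h
    have hd : L[k + 1]? = some d := by
      have h0 := congrArg (fun t => t[0]?) hdrop'
      simpa using h0
    have hgetD : L.getD (k + 1) ' ' = d := by simp [List.getD, hd]
    have hpe : pvEnum k (c :: d :: ds) = (k, c) :: pvEnum (k + 1) (d :: ds) := rfl
    by_cases hud : 'A' ≤ d ∧ d ≤ 'Z'
    · have hstep : aStep L (acc, tmp) (k, c) =
          (acc ++ [String.mk (if 'A' ≤ c ∧ c ≤ 'Z' then [c] else tmp ++ [c])],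
           (if 'A' ≤ c ∧ c ≤ 'Z' then [c] else tmp ++ [c])) := by
        simp only [aStep]
        rw [if_neg hk, hgetD, if_pos hud]
      rw [hpe, List.foldl_cons, hstep, ih d (k + 1) L _ _ hdrop']
      simp [goTok, hud]
    · have hstep : aStep L (acc, tmp) (k, c) =
          (acc, (if 'A' ≤ c ∧ c ≤ 'Z' then [c] else tmp ++ [c])) := by
        simp only [aStep]
        rw [if_neg hk, hgetD, if_neg hud]
      rw [hpe, List.foldl_cons, hstep, ih d (k + 1) L _ _ hdrop']
      simp [goTok, hud]

-- ===== VERDICT (by name: the statement is the Claim_ definition above) =====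
theorem String_To_Atoms_spec : Claim_equal_String_To_Atoms := by
  intro s _
  unfold Spec_String_To_Atoms String_To_Atoms String_To_Atoms_alt
  cases hl : s.toList with
  | nil => simp [pvEnum]
  | cons c cs =>
    have hA := a_go cs c 0 (c :: cs) [] [] (by simp)
    have hfirst : bStep [] c = [] ++ [[c]] := by simp [bStep]
    have hc : (if 'A' ≤ c ∧ c ≤ 'Z' then [c] else ([] : List Char) ++ [c]) = [c] := by
      split <;> simp
    rw [hc] at hA
    simp only [List.foldl_cons, hfirst, b_go cs [] [c]]
    simpa using hA
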